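-- pv_equiv track=rewrite | github.com/mfurga-cs/asd | kolos2/zad3b.py | min_stops
-- ===== SOURCE A (Python) =====
-- from queue import PriorityQueue
--
-- def min_stops(A):
--   n = len(A)
--   scope = 0
--   count = 0
--
--   V = [False] * n
--
--   q = PriorityQueue()
--   q.put((A[0], (0, A[0])))
--   V[0] = True
--
--   res = []
--
--   while True:
--     _, v = q.get()
--     i, v = v
--
--     res.append(i)
--
--     scope += v
--     count += 1
--
--     for i in range(scope + 1):
--       if i == len(A) - 1:
--         return res
--
--       if V[i]:
--         continue
--       V[i] = True
--
--       q.put((A[i] * -1, (i, A[i])))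
-- ===== SOURCE B (Python) =====
-- def min_stops(A):
--   n = len(A)
--   res = [0]
--   taken = [True] + [False] * (n - 1)
--   scope = A[0]
--   unlocked = 1
--   while scope < n - 1:
--     unlocked = max(unlocked, scope + 1)
--     best = -1
--     for j in range(unlocked):
--       if not taken[j] and (best < 0 or A[j] > A[best]):
--         best = j
--     if best < 0:
--       raise ValueError("target unreachable")
--     taken[best] = True
--     res.append(best)
--     scope += A[best]
--   return res
-- ===== Notes on version B (the rewrite author's own statement) =====
-- stated objective: alternative
-- what changed: B discards A's PriorityQueue and visited array and instead keeps a taken-list plus an advancing 'unlocked' frontier, choosing each stop by a direct linear argmax scan over the unlocked indices and testing scope >= n-1 directly instead of walking range(scope+1) to find index n-1.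
import Mathlib
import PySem

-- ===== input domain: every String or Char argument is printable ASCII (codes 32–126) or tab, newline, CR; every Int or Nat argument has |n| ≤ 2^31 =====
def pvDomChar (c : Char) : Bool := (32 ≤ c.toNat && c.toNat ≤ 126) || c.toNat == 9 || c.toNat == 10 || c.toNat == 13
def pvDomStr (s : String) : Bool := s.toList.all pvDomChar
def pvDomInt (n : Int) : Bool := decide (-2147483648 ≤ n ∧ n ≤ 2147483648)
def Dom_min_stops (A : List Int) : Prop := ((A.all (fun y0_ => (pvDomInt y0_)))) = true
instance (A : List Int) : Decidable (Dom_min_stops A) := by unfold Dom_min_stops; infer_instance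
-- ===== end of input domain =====

-- B removes A's priority queue and visited array entirely: it keeps a taken-list and an
-- unlocked frontier and picks each stop by a direct argmax scan (objective: alternative).

-- ===== PORT A =====
-- Priority-queue element: (priority, (index, value)); Python's PriorityQueue pops the
-- lexicographically least element.  All pushed elements are distinct (distinct index),
-- so extracting the unique minimum is exact Python semantics.
def tripLt (a b : Int × Int × Int) : Bool :=
  decide (a.1 < b.1 ∨ (a.1 = b.1 ∧ (a.2.1 < b.2.1 ∨ (a.2.1 = b.2.1 ∧ a.2.2 < b.2.2))))

def pqGet (q : List (Int × Int × Int)) : Option ((Int × Int × Int) × List (Int × Int × Int)) :=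
  match q with
  | [] => none
  | x :: xs =>
    let m := xs.foldl (fun m y => if tripLt y m then y else m) x
    some (m, (x :: xs).erase m)

-- the inner 'for i in range(scope + 1)' of A, run as Python does: a counter j going
-- 0, 1, … while j < scope+1 (range is lazy; the loop exits at i == len(A)-1, so at most
-- len(A)+1 steps ever run — that bound is the fuel).  none = 'return res'.
-- V[i] / A[i] reads use pyGetD; all reachable reads are in range, where pyGetD is exact.
def innerA (Aℓ : List Int) (n b : Int) : Nat → Int → List Bool → List (Int × Int × Int) →
    Option (List Bool × List (Int × Int × Int))
  | 0, _, V, q => some (V, q)     -- fuel out: never reached (fuel > #iterations)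
  | fuel + 1, j, V, q =>
    if j < b then
      if j = n - 1 then none
      else if PySem.List.pyGetD V j false then innerA Aℓ n b fuel (j + 1) V q
      else innerA Aℓ n b fuel (j + 1) (V.set j.toNat true)
          (q ++ [(-(PySem.List.pyGetD Aℓ j 0), j, PySem.List.pyGetD Aℓ j 0)])
    else some (V, q)

-- the 'while True' of A; fuel bounds the number of pops (≤ n pushes ever happen, so
-- fuel n+1 is never exhausted on inputs where the Python terminates)
def loopA (Aℓ : List Int) (n : Int) : Nat → List Bool → List (Int × Int × Int) → Int → List Int → List Int
  | 0, _, _, _, res => res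
  | fuel + 1, V, q, scope, res =>
    match pqGet q with
    | none => res            -- Python blocks here forever; excluded by Pre_
    | some ((_, i, v), q') =>
      let res' := res ++ [i]
      let scope' := scope + v
      match innerA Aℓ n (scope' + 1) (Aℓ.length + 1) 0 V q' with
      | none => res'
      | some (V', q'') => loopA Aℓ n fuel V' q'' scope' res'

def min_stops (A : List Int) : List Int :=
  loopA A A.length (A.length + 1)
    ((List.replicate A.length false).set 0 true)
    [(PySem.List.pyGetD A 0 0, 0, PySem.List.pyGetD A 0 0)]
    0 []

-- ===== PORT B =====
-- 'for j in range(unlocked): if not taken[j] and (best < 0 or A[j] > A[best]): best = j'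
-- (Python's short-circuit 'or' never reads A[best] when best < 0; the total pyGetD read
-- here is likewise irrelevant then, since the left disjunct already holds)
def bestIdx (Aℓ : List Int) (taken : List Bool) (u : Int) : Int :=
  (PySem.List.pyRange 0 u 1).foldl
    (fun best j =>
      if PySem.List.pyGetD taken j false = false ∧
          (best < 0 ∨ PySem.List.pyGetD Aℓ best 0 < PySem.List.pyGetD Aℓ j 0)
      then j else best) (-1)

-- the 'while scope < n - 1' loop; one selection per fuel unit (at most n-1 selections
-- happen on inputs where the Python returns, so fuel n is never exhausted there)
def loopB (Aℓ : List Int) (n : Int) : Nat → List Bool → List Int → Int → Int → List Int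
  | 0, _, res, _, _ => res
  | fuel + 1, taken, res, scope, unlocked =>
    if scope < n - 1 then
      let u := max unlocked (scope + 1)
      let b := bestIdx Aℓ taken u
      if b < 0 then res      -- Python raises ValueError here; excluded by Pre_
      else loopB Aℓ n fuel (taken.set b.toNat true) (res ++ [b])
            (scope + PySem.List.pyGetD Aℓ b 0) u
    else res

def min_stops_alt (A : List Int) : List Int :=
  loopB A A.length A.length
    (true :: List.replicate (A.length - 1) false)
    [0] (PySem.List.pyGetD A 0 0) 1

-- ===== PRECONDITION & SPEC =====
-- single-pass positive-reach fold: r starts at A[0]; index i contributes max(A[i],0) iff i ≤ r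
def reachAux (r : Int) (i : Int) : List Int → Int
  | [] => r
  | x :: xs => reachAux (if i ≤ r then r + max x 0 else r) (i + 1) xs

-- Pre_ excludes the empty list (A raises IndexError on A[0]) and exactly the inputs on
-- which A never returns: there q.get() blocks forever once the reachable positive values
-- cannot push the scope to len(A)-1; the fold below computes that maximal reachable scope.
def Pre_min_stops (A : List Int) : Prop :=
  A ≠ [] ∧ (A.length : Int) - 1 ≤ reachAux (A.headD 0) 1 A.tail
instance (A : List Int) : Decidable (Pre_min_stops A) := by unfold Pre_min_stops; infer_instance

def pvWitness_min_stops : List Int := [2, 1, 0, 1, 0]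

def Spec_min_stops (A : List Int) (out : List Int) : Prop := out = min_stops_alt A
instance (A : List Int) (out : List Int) : Decidable (Spec_min_stops A out) := by unfold Spec_min_stops; infer_instance

-- ===== CLAIM (what is proved, stated in full; the proofs are below) =====
def Claim_equal_min_stops : Prop := ∀ (A : List Int), Dom_min_stops A → Pre_min_stops A → Spec_min_stops A (min_stops A)

-- ===== LEMMAS AND PROOFS =====

-- A's visited array after the indices < nxt have been marked
def mkV (n nxt : Nat) : List Bool := (List.range n).map (fun j => decide (j < nxt))

def trip (Aℓ : List Int) (j : Int) : Int × Int × Int :=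
  (-(PySem.List.pyGetD Aℓ j 0), j, PySem.List.pyGetD Aℓ j 0)

def pushL (Aℓ : List Int) (a b : Int) : List (Int × Int × Int) :=
  (PySem.List.pyRange a b 1).map (trip Aℓ)

-- A's queue content when the pushed indices are those < k and the popped ones are 'taken'
def qLN (Aℓ : List Int) (t : List Bool) (k : Nat) : List (Int × Int × Int) :=
  ((List.range k).filter (fun j => t.getD j false = false)).map (fun j : Nat => trip Aℓ (j : Int))

-- B's argmax scan over Nat range (bridge target of bestIdx)
def bestN (Aℓ : List Int) (t : List Bool) (k : Nat) : Int :=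
  (List.range k).foldl
    (fun best (j : Nat) =>
      if t.getD j false = false ∧
          (best < 0 ∨ PySem.List.pyGetD Aℓ best 0 < PySem.List.pyGetD Aℓ (j : Int) 0)
      then ((j : Nat) : Int) else best) (-1)

def pqMin (l : List (Int × Int × Int)) : Option (Int × Int × Int) :=
  match l with
  | [] => none
  | x :: xs => some (xs.foldl (fun m y => if tripLt y m then y else m) x)

theorem mkV_getD (n nxt : Nat) (j : Int) (h0 : 0 ≤ j) (h1 : j < (n : Int)) :
    PySem.List.pyGetD (mkV n nxt) j false = decide (j < (nxt : Int)) := by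
  have h2 : j.toNat < n := by omega
  rw [← Int.toNat_of_nonneg h0, PySem.List.pyGetD_natCast]
  simp [mkV, List.getD, h2]
  rw [Bool.eq_iff_iff]; simp only [Bool.and_eq_true, decide_eq_true_eq]
  omega

theorem mkV_set (n nxt : Nat) (h : nxt < n) :
    (mkV n nxt).set nxt true = mkV n (nxt + 1) := by
  apply List.ext_getElem
  · simp [mkV]
  · intro i h1 h2
    by_cases hie : i = nxt <;> simp [mkV, List.getElem_set, hie]
    rw [Bool.eq_iff_iff]; simp only [Bool.or_eq_true, decide_eq_true_eq]
    omega

theorem mkV_one (n : Nat) (h : 1 ≤ n) :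
    (List.replicate n false).set 0 true = mkV n 1 := by
  apply List.ext_getElem
  · simp [mkV]
  · intro i h1 h2
    by_cases hie : i = 0 <;> simp [mkV, List.getElem_set, hie] <;> omega

theorem pushL_nil (Aℓ : List Int) (a b : Int) (h : b ≤ a) : pushL Aℓ a b = [] := by
  simp [pushL, PySem.List.pyRange_one_eq_nil h]

theorem pushL_cons (Aℓ : List Int) (a b : Int) (h : a < b) :
    pushL Aℓ a b = trip Aℓ a :: pushL Aℓ (a + 1) b := by
  simp [pushL, PySem.List.pyRange_one_cons h]

theorem innerA_none (Aℓ : List Int) (n b : Int) :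
    ∀ (fuel : Nat) (a : Int) (V : List Bool) (q : List (Int × Int × Int)),
      (n - 1 - a).toNat < fuel → 0 ≤ a → a ≤ n - 1 → n - 1 < b →
      innerA Aℓ n b fuel a V q = none := by
  intro fuel
  induction fuel with
  | zero => intro a V q hk h0 h1 h2; omega
  | succ fuel ih =>
    intro a V q hk h0 h1 h2
    have hab : a < b := by omega
    by_cases he : a = n - 1
    · simp [innerA, hab, he]
      omega
    · cases hv : PySem.List.pyGetD V a false <;>
        · simp only [innerA, hab, he, hv, if_false, if_true, Bool.false_eq_true, reduceIte]
          exact ih _ _ _ (by omega) (by omega) (by omega) h2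

theorem innerA_some (Aℓ : List Int) (b : Int) :
    ∀ (fuel : Nat) (a : Int) (nxt : Nat) (q : List (Int × Int × Int)),
      (b - a).toNat < fuel → 0 ≤ a → a ≤ (nxt : Int) → nxt ≤ Aℓ.length → b ≤ (Aℓ.length : Int) - 1 →
      innerA Aℓ (Aℓ.length : Int) b fuel a (mkV Aℓ.length nxt) q =
        some (mkV Aℓ.length (max nxt b.toNat), q ++ pushL Aℓ (nxt : Int) b) := by
  intro fuel
  induction fuel with
  | zero => intro a nxt q hk h0 h1 h2 h3; omega
  | succ fuel ih =>
    intro a nxt q hk h0 h1 h2 h3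
    by_cases hab : a < b
    case neg =>
      rw [pushL_nil Aℓ _ _ (by omega)]
      simp only [innerA, hab, if_false, reduceIte, List.append_nil]
      have : max nxt b.toNat = nxt := by omega
      rw [this]
    case pos =>
    have han : a < (Aℓ.length : Int) := by omega
    have he : ¬ a = (Aℓ.length : Int) - 1 := by omega
    by_cases hlt : a < (nxt : Int)
    · -- already visited: skip
      simp only [innerA, hab, he, if_false, reduceIte,
        mkV_getD Aℓ.length nxt a h0 han, hlt, decide_true, if_true]
      exact ih (a + 1) nxt q (by omega) (by omega) (by omega) h2 h3
    · -- a = nxt: mark, push, continue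
      have ha : a = (nxt : Int) := by omega
      have hnn : nxt < Aℓ.length := by omega
      have htn : a.toNat = nxt := by omega
      simp only [innerA, hab, he, if_false, reduceIte,
        mkV_getD Aℓ.length nxt a h0 han, hlt, decide_false, Bool.false_eq_true]
      rw [htn, mkV_set Aℓ.length nxt hnn,
        ih (a + 1) (nxt + 1) _ (by omega) (by omega) (by omega) (by omega) h3]
      have hmax : max (nxt + 1) b.toNat = max nxt b.toNat := by omega
      rw [hmax, pushL_cons Aℓ _ _ (by omega : (nxt : Int) < b), ha]
      simp [trip]

theorem trip_snd_inj (Aℓ : List Int) (x y : Int) (h : trip Aℓ x = trip Aℓ y) : x = y := by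
  simpa [trip] using congrArg (fun p => p.2.1) h

theorem tripLt_trip (Aℓ : List Int) (j b : Int) (h : b < j) :
    tripLt (trip Aℓ j) (trip Aℓ b)
      = decide (PySem.List.pyGetD Aℓ b 0 < PySem.List.pyGetD Aℓ j 0) := by
  simp only [tripLt, trip, decide_eq_decide]
  constructor
  · rintro (h1 | ⟨h1, h2 | ⟨h2, h3⟩⟩) <;> omega
  · intro h1; left; omega

theorem bestIdx_eq_bestN (Aℓ : List Int) (t : List Bool) (u : Int) :
    bestIdx Aℓ t u = bestN Aℓ t u.toNat := by
  simp [bestIdx, bestN, PySem.List.pyRange_one, List.foldl_map]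

theorem pqGet_eq_pqMin (l : List (Int × Int × Int)) (m : Int × Int × Int)
    (h : pqMin l = some m) : pqGet l = some (m, l.erase m) := by
  cases l with
  | nil => simp [pqMin] at h
  | cons x xs =>
    simp only [pqMin, Option.some.injEq] at h
    simp [pqGet, h]

theorem pqMin_append_singleton (l : List (Int × Int × Int)) (y : Int × Int × Int) :
    pqMin (l ++ [y]) =
      some ((pqMin l).elim y (fun m => if tripLt y m then y else m)) := by
  cases l with
  | nil => simp [pqMin]
  | cons x xs => simp [pqMin, List.foldl_append]

theorem mem_qLN (Aℓ : List Int) (t : List Bool) (b k : Nat)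
    (hk : b < k) (hb : t.getD b false = false) : trip Aℓ (b : Int) ∈ qLN Aℓ t k := by
  exact List.mem_map_of_mem (by rw [List.mem_filter]; exact ⟨List.mem_range.2 hk, by simp [List.getD] at hb ⊢; simp [hb]⟩)

theorem not_mem_qLN (Aℓ : List Int) (t : List Bool) (k : Nat) :
    trip Aℓ (k : Int) ∉ qLN Aℓ t k := by
  intro h
  obtain ⟨j, hj, he⟩ := List.mem_map.1 h
  have hjr := List.mem_range.1 (List.mem_of_mem_filter hj)
  have := trip_snd_inj Aℓ _ _ he
  omega

theorem qLN_set_of_le (Aℓ : List Int) (t : List Bool) (b : Nat) (v : Bool) (k : Nat)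
    (h : k ≤ b) : qLN Aℓ (t.set b v) k = qLN Aℓ t k := by
  unfold qLN
  congr 1
  apply List.filter_congr
  intro j hj
  rw [List.mem_range] at hj
  simp [List.getD, List.getElem?_set_ne (show b ≠ j by omega)]

theorem bestN_succ (Aℓ : List Int) (t : List Bool) (k : Nat) :
    bestN Aℓ t (k + 1) =
      (if t.getD k false = false ∧
          (bestN Aℓ t k < 0 ∨ PySem.List.pyGetD Aℓ (bestN Aℓ t k) 0 < PySem.List.pyGetD Aℓ (k : Int) 0)
       then ((k : Nat) : Int) else bestN Aℓ t k) := by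
  simp [bestN, List.range_succ]

theorem qLN_succ (Aℓ : List Int) (t : List Bool) (k : Nat) :
    qLN Aℓ t (k + 1) =
      qLN Aℓ t k ++ (if t.getD k false = false then [trip Aℓ (k : Int)] else []) := by
  by_cases h : t.getD k false = false <;> [skip; skip] <;>
    first
    | (simp only [List.getD] at h; simp [qLN, List.range_succ, List.getD, h])

theorem pushL_snoc (Aℓ : List Int) (a b : Int) (h : a ≤ b) :
    pushL Aℓ a (b + 1) = pushL Aℓ a b ++ [trip Aℓ b] := by
  simp [pushL, PySem.List.pyRange_one_succ_right h]

-- the unique minimum of A's queue is exactly the index B's scan selects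
theorem qLN_main (Aℓ : List Int) (t : List Bool) :
    ∀ k : Nat,
      (bestN Aℓ t k = -1 ∧ qLN Aℓ t k = []) ∨
      (∃ b : Nat, bestN Aℓ t k = (b : Int) ∧ b < k ∧ t.getD b false = false ∧
        pqMin (qLN Aℓ t k) = some (trip Aℓ (b : Int))) := by
  intro k
  induction k with
  | zero => left; exact ⟨rfl, rfl⟩
  | succ k ih =>
    rw [bestN_succ, qLN_succ]
    by_cases hk : t.getD k false = false
    · have hk' : t[k]?.getD false = false := by simpa [List.getD] using hk
      rcases ih with ⟨hb, hq⟩ | ⟨b, hb, hbk, hbu, hm⟩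
      · right
        refine ⟨k, ?_, by omega, hk, ?_⟩
        · rw [hb]; simp [hk']
        · rw [hq]; simp [hk', pqMin]
      · right
        have hmin := pqMin_append_singleton (qLN Aℓ t k) (trip Aℓ (k : Int))
        rw [hm] at hmin
        simp only [Option.elim] at hmin
        rw [tripLt_trip Aℓ (k : Int) (b : Int) (by exact_mod_cast hbk)] at hmin
        simp only [PySem.List.pyGetD_natCast, List.getD] at hmin
        by_cases hcmp : Aℓ[b]?.getD 0 < Aℓ[k]?.getD 0
        · refine ⟨k, ?_, by omega, hk, ?_⟩
          · rw [hb]; simp [hk', List.getD, hcmp]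
          · rw [if_pos hk, hmin]
            simp [hcmp]
        · refine ⟨b, ?_, by omega, hbu, ?_⟩
          · rw [hb]
            simp [hk', List.getD, hcmp]
          · rw [if_pos hk, hmin]
            simp [hcmp]
    · have hcond : ¬ (t.getD k false = false ∧
          (bestN Aℓ t k < 0 ∨ PySem.List.pyGetD Aℓ (bestN Aℓ t k) 0 < PySem.List.pyGetD Aℓ (k : Int) 0)) := by
        intro h; exact hk h.1
      rw [if_neg hcond, if_neg hk, List.append_nil]
      rcases ih with ⟨h1, h2⟩ | ⟨b, h1, h2, h3, h4⟩
      · exact Or.inl ⟨h1, h2⟩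
      · exact Or.inr ⟨b, h1, by omega, h3, h4⟩

-- popping the minimum = marking its index taken
theorem qLN_erase (Aℓ : List Int) (t : List Bool) (b : Nat)
    (hb : t.getD b false = false) (hlen : b < t.length) :
    ∀ k : Nat, b < k →
      (qLN Aℓ t k).erase (trip Aℓ (b : Int)) = qLN Aℓ (t.set b true) k := by
  intro k
  induction k with
  | zero => intro h; omega
  | succ k ih =>
    intro hbk
    rw [qLN_succ, qLN_succ]
    by_cases hbe : b = k
    · subst hbe
      rw [if_pos hb, List.erase_append_right _ (not_mem_qLN Aℓ t b),
        qLN_set_of_le Aℓ t b true b le_rfl]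
      have hset : (t.set b true)[b]?.getD false = true := by
        simp [List.getElem?_set_self hlen]
      rw [if_neg (by simp [List.getD, hset]), List.erase_cons_head]
    · have hne : (t.set b true).getD k false = t.getD k false := by
        simp [List.getD, List.getElem?_set_ne (show b ≠ k from hbe)]
      by_cases hk : t.getD k false = false
      · rw [if_pos hk, if_pos (hne.trans hk),
          List.erase_append_left _ (mem_qLN Aℓ t b k (by omega) hb), ih (by omega)]
      · rw [if_neg hk, if_neg (fun h => hk (hne.symm.trans h))]
        simpa using ih (by omega)

theorem qLN_ext_aux (Aℓ : List Int) (t : List Bool) (k : Nat) :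
    ∀ m : Nat, (∀ j : Nat, k ≤ j → j < k + m → t.getD j false = false) →
      qLN Aℓ t (k + m) = qLN Aℓ t k ++ pushL Aℓ (k : Int) ((k : Int) + (m : Int)) := by
  intro m
  induction m with
  | zero => intro _; rw [pushL_nil Aℓ _ _ (by omega)]; simp
  | succ m ih =>
    intro h
    have hc : ((k : Int) + (m : Int) + 1) = (k : Int) + ((m : Nat) + 1 : Nat) := by push_cast; ring
    rw [show k + (m + 1) = (k + m) + 1 from rfl, qLN_succ,
      if_pos (h (k + m) (by omega) (by omega)),
      ih (fun j h1 h2 => h j h1 (by omega)),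
      ← hc, pushL_snoc Aℓ (k : Int) ((k : Int) + (m : Int)) (by omega)]
    push_cast
    simp [List.append_assoc]

-- pushing the freshly unlocked indices = extending the frontier of qLN
theorem qLN_ext (Aℓ : List Int) (t : List Bool) (k : Nat) (v : Int)
    (h : ∀ j : Nat, k ≤ j → (j : Int) < v → t.getD j false = false) :
    qLN Aℓ t (max k v.toNat) = qLN Aℓ t k ++ pushL Aℓ (k : Int) v := by
  by_cases hv : v ≤ (k : Int)
  · rw [show max k v.toNat = k by omega, pushL_nil Aℓ _ _ hv]
    simp
  · have hm : max k v.toNat = k + (v.toNat - k) := by omega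
    have hv' : v = (k : Int) + ((v.toNat - k : Nat) : Int) := by omega
    rw [hm, qLN_ext_aux Aℓ t k (v.toNat - k) (fun j h1 h2 => h j h1 (by omega)), ← hv']

theorem loopB_stop (Aℓ : List Int) (n : Int) (fuel : Nat) (t : List Bool)
    (res : List Int) (scope u : Int) (h : ¬ scope < n - 1) :
    loopB Aℓ n fuel t res scope u = res := by
  cases fuel <;> simp [loopB, h]

-- lockstep: A's pop-and-push iteration = B's scan-and-select iteration
theorem loop_eq (Aℓ : List Int) :
    ∀ (fuel : Nat) (taken : List Bool) (scope unlocked : Int) (res : List Int) (k : Nat),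
      taken.length = Aℓ.length →
      scope < (Aℓ.length : Int) - 1 →
      1 ≤ unlocked →
      (k : Int) = max unlocked (scope + 1) →
      k ≤ Aℓ.length →
      (∀ j : Nat, k ≤ j → taken.getD j false = false) →
      loopA Aℓ (Aℓ.length : Int) fuel (mkV Aℓ.length k) (qLN Aℓ taken k) scope res
        = loopB Aℓ (Aℓ.length : Int) fuel taken res scope unlocked := by
  intro fuel
  induction fuel with
  | zero => intro taken scope unlocked res k _ _ _ _ _ _; rfl
  | succ fuel ih =>
    intro taken scope unlocked res k hlen hscope hu hk hkn hout
    have hbi : bestIdx Aℓ taken (max unlocked (scope + 1)) = bestN Aℓ taken k := by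
      rw [bestIdx_eq_bestN, ← hk, Int.toNat_natCast]
    rcases qLN_main Aℓ taken k with ⟨hb, hq⟩ | ⟨b, hb, hbk, hbu, hm⟩
    · rw [hq]
      simp only [loopA, loopB, pqGet, if_pos hscope, hbi, hb]
      norm_num
    · have hget := pqGet_eq_pqMin _ _ hm
      rw [qLN_erase Aℓ taken b hbu (by omega) k hbk] at hget
      simp only [loopA, loopB, hget, trip, if_pos hscope, hbi, hb]
      rw [if_neg (by omega : ¬ ((b : Nat) : Int) < 0)]
      rw [Int.toNat_natCast]
      set scope' := scope + PySem.List.pyGetD Aℓ ((b : Nat) : Int) 0 with hscope'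
      by_cases hr : (Aℓ.length : Int) - 1 ≤ scope'
      · rw [innerA_none Aℓ (Aℓ.length : Int) (scope' + 1) (Aℓ.length + 1) 0 _ _
            (by omega) le_rfl (by omega) (by omega)]
        rw [loopB_stop Aℓ _ fuel _ _ _ _ (by omega)]
      · have hset_len : (taken.set b true).length = Aℓ.length := by
          rw [List.length_set, hlen]
        have hout' : ∀ j : Nat, k ≤ j → (taken.set b true).getD j false = false := by
          intro j hj
          rw [show (taken.set b true).getD j false = (taken.set b true)[j]?.getD false from rfl,
            List.getElem?_set_ne (show b ≠ j by omega)]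
          exact hout j hj
        rw [innerA_some Aℓ (scope' + 1) (Aℓ.length + 1) 0 k _
            (by omega) le_rfl (by omega) hkn (by omega)]
        rw [← qLN_ext Aℓ (taken.set b true) k (scope' + 1)
            (fun j h1 _ => hout' j h1)]
        have hcast : ((max k (scope' + 1).toNat : Nat) : Int) = max (k : Int) (scope' + 1) := by
          omega
        exact ih (taken.set b true) scope' (max unlocked (scope + 1))
            (res ++ [((b : Nat) : Int)]) (max k (scope' + 1).toNat)
            hset_len (by omega) (by omega) (by omega) (by omega)
            (fun j hj => hout' j (by omega))
      

-- ===== VERDICT (by name: the statement is the Claim_ definition above) =====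
theorem min_stops_spec : Claim_equal_min_stops := by
  intro A _hDom hPre
  unfold Spec_min_stops min_stops min_stops_alt
  obtain ⟨hne, -⟩ := hPre
  have hn : 1 ≤ A.length := by
    cases A with
    | nil => exact absurd rfl hne
    | cons a as => simp
  rw [mkV_one A.length hn]
  simp only [loopA, pqGet, List.foldl_nil, List.erase_cons_head, List.nil_append]
  by_cases hs : (A.length : Int) - 1 ≤ 0 + PySem.List.pyGetD A 0 0
  · rw [innerA_none A (A.length : Int) (0 + PySem.List.pyGetD A 0 0 + 1) (A.length + 1) 0 _ _
        (by omega) le_rfl (by omega) (by omega)]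
    rw [loopB_stop A _ A.length _ _ _ _ (by omega)]
  · have htk : (true :: List.replicate (A.length - 1) false).length = A.length := by
      simp; omega
    have hout0 : ∀ j : Nat, 1 ≤ j →
        (true :: List.replicate (A.length - 1) false).getD j false = false := by
      intro j hj
      match j, hj with
      | j + 1, _ =>
        simp only [List.getD, List.getElem?_cons_succ, List.getElem?_replicate]
        split <;> simp
    rw [innerA_some A (0 + PySem.List.pyGetD A 0 0 + 1) (A.length + 1) 0 1 _
        (by omega) le_rfl (by omega) hn (by omega)]
    have hq1 : qLN A (true :: List.replicate (A.length - 1) false) 1 = [] := by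
      simp [qLN, List.range_succ, List.getD]
    have hext : qLN A (true :: List.replicate (A.length - 1) false)
          (max 1 (0 + PySem.List.pyGetD A 0 0 + 1).toNat)
        = pushL A ((1 : Nat) : Int) (0 + PySem.List.pyGetD A 0 0 + 1) := by
      rw [qLN_ext A (true :: List.replicate (A.length - 1) false) 1
        (0 + PySem.List.pyGetD A 0 0 + 1) (fun j h1 _ => hout0 j h1), hq1, List.nil_append]
    rw [List.nil_append, ← hext]
    have := loop_eq A A.length (true :: List.replicate (A.length - 1) false)
      (0 + PySem.List.pyGetD A 0 0) 1 [0]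
      (max 1 (0 + PySem.List.pyGetD A 0 0 + 1).toNat)
      htk (by omega) le_rfl (by omega) (by omega) (fun j hj => hout0 j (by omega))
    exact this.trans (by norm_num)
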